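-- pv_equiv track=rewrite | github.com/ScottSyms/itsgassesment | src/mcp_servers/control_mapper/tools.py | calculate_impact_level
-- ===== SOURCE A (Python) =====
-- from typing import Dict, List, Any
--
-- def calculate_impact_level(factors: List[str]) -> str:
--     """
--     Calculate impact level based on various factors.
--
--     Args:
--         factors: List of impact factors
--
--     Returns:
--         Impact level (Low, Moderate, High)
--     """
--     high_indicators = [
--         "life safety",
--         "national security",
--         "critical infrastructure",
--         "secret",
--         "top secret",
--         "protected c",
--     ]
--
--     moderate_indicators = [
--         "protected b",
--         "financial",
--         "personal information",
--         "privacy",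
--         "business critical",
--     ]
--
--     factors_lower = [f.lower() for f in factors]
--
--     for indicator in high_indicators:
--         if any(indicator in f for f in factors_lower):
--             return "High"
--
--     for indicator in moderate_indicators:
--         if any(indicator in f for f in factors_lower):
--             return "Moderate"
--
--     return "Low"
-- ===== SOURCE B (Python) =====
-- def calculate_impact_level(factors):
--     """Single pass over the factors with a found_moderate flag (same results as the two-pass version)."""
--     high_indicators = (
--         "life safety",
--         "national security",
--         "critical infrastructure",
--         "secret",
--         "top secret",
--         "protected c",
--     )
--     moderate_indicators = (
--         "protected b",
--         "financial",
--         "personal information",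
--         "privacy",
--         "business critical",
--     )
--     found_moderate = False
--     for factor in factors:
--         f = factor.lower()
--         if any(ind in f for ind in high_indicators):
--             return "High"
--         if not found_moderate and any(ind in f for ind in moderate_indicators):
--             found_moderate = True
--     return "Moderate" if found_moderate else "Low"
-- ===== Notes on version B (the rewrite author's own statement) =====
-- stated objective: alternative
-- what changed: Replaced A's two sequential passes over the indicator lists (each scanning all factors) by a single pass over the factors that returns High immediately on a high-indicator match and maintains a found_moderate flag, deciding Moderate/Low after the loop.
import Mathlib
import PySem

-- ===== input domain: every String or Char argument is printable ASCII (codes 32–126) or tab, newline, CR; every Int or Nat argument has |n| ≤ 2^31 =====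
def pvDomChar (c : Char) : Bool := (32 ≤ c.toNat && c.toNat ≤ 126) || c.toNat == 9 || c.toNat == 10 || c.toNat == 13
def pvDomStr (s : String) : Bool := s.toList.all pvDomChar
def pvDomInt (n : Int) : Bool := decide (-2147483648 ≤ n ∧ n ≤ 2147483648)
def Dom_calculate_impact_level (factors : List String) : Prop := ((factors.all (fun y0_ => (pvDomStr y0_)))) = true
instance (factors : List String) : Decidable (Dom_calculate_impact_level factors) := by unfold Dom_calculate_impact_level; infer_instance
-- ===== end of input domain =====

-- B replaces A's two passes over the indicator lists by one pass over the factors with a found_moderate flag (alternative decomposition, same results).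

-- ===== PORT A =====
def pvHighIndicators : List String :=
  ["life safety", "national security", "critical infrastructure", "secret", "top secret", "protected c"]

def pvModerateIndicators : List String :=
  ["protected b", "financial", "personal information", "privacy", "business critical"]

-- A's 'for indicator in …: if any(indicator in f for f in factors_lower): return <lvl>' loop:
-- returns true as soon as some indicator occurs in some lowered factor.
def pvLoopA (inds : List String) (factors_lower : List String) : Bool :=
  match inds with
  | [] => false
  | ind :: rest =>
    if factors_lower.any (fun f => PySem.Str.isIn ind f) then true
    else pvLoopA rest factors_lower

def calculate_impact_level (factors : List String) : String :=
  let factors_lower := factors.map PySem.Str.lower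
  if pvLoopA pvHighIndicators factors_lower then "High"
  else if pvLoopA pvModerateIndicators factors_lower then "Moderate"
  else "Low"

-- ===== PORT B =====
-- B's single loop over the factors, carrying the found_moderate flag.
def pvLoopB (factors : List String) (found_moderate : Bool) : String :=
  match factors with
  | [] => if found_moderate then "Moderate" else "Low"
  | factor :: rest =>
    let f := PySem.Str.lower factor
    if pvHighIndicators.any (fun ind => PySem.Str.isIn ind f) then "High"
    else if !found_moderate && pvModerateIndicators.any (fun ind => PySem.Str.isIn ind f) then
      pvLoopB rest true
    else pvLoopB rest found_moderate

def calculate_impact_level_alt (factors : List String) : String :=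
  pvLoopB factors false

-- ===== PRECONDITION & SPEC =====
def Spec_calculate_impact_level (factors : List String) (out : String) : Prop := out = calculate_impact_level_alt factors
instance (factors : List String) (out : String) : Decidable (Spec_calculate_impact_level factors out) := by unfold Spec_calculate_impact_level; infer_instance

-- ===== CLAIM (what is proved, stated in full; the proofs are below) =====
def Claim_equal_calculate_impact_level : Prop := ∀ (factors : List String), Dom_calculate_impact_level factors → Spec_calculate_impact_level factors (calculate_impact_level factors)

-- ===== LEMMAS AND PROOFS =====

-- A's indicator loop is an existence test, with the two quantifiers swappable.
-- any distributes over || (helper for pvLoopA_eq)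
theorem pvAny_or (l : List String) (p q : String → Bool) :
    l.any (fun x => p x || q x) = (l.any p || l.any q) := by
  induction l with
  | nil => simp
  | cons a t ih =>
    cases ha : p a <;> cases hq : q a <;> simp [List.any_cons, ih, ha, hq]

theorem pvLoopA_eq (inds fl : List String) :
    pvLoopA inds fl = fl.any (fun f => inds.any (fun ind => PySem.Str.isIn ind f)) := by
  induction inds with
  | nil => simp [pvLoopA]
  | cons ind rest ih =>
    rw [pvLoopA, ih]
    simp only [List.any_cons]
    rw [pvAny_or]
    cases h : fl.any (fun f => PySem.Str.isIn ind f) <;> simp_all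

-- B's loop characterised: High if any lowered factor has a high indicator, else Moderate
-- if the flag is set or any lowered factor has a moderate indicator, else Low.
theorem pvLoopB_eq (factors : List String) (fm : Bool) :
    pvLoopB factors fm =
      if factors.any (fun x => pvHighIndicators.any (fun ind => PySem.Str.isIn ind (PySem.Str.lower x))) then "High"
      else if fm || factors.any (fun x => pvModerateIndicators.any (fun ind => PySem.Str.isIn ind (PySem.Str.lower x))) then "Moderate"
      else "Low" := by
  induction factors generalizing fm with
  | nil => simp [pvLoopB]
  | cons factor rest ih =>
    rw [pvLoopB]
    simp only [List.any_cons]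
    by_cases hH : ∃ x ∈ pvHighIndicators, PySem.Chars.isIn x.toList (PySem.Chars.lower factor.toList) = true
    · simp [hH]
    · by_cases hM : ∃ x ∈ pvModerateIndicators, PySem.Chars.isIn x.toList (PySem.Chars.lower factor.toList) = true
      · cases fm <;> simp [ih, hH, hM]
      · cases fm <;> simp [ih, hH, hM]

-- ===== VERDICT (by name: the statement is the Claim_ definition above) =====
theorem calculate_impact_level_spec : Claim_equal_calculate_impact_level := by
  intro factors _
  unfold Spec_calculate_impact_level calculate_impact_level calculate_impact_level_alt
  rw [pvLoopB_eq]
  simp only [pvLoopA_eq, List.any_map, Function.comp_def, Bool.false_or]
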